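-- pv_equiv track=rewrite | github.com/filedesless/aoc | 2021/day24/src/monad.py | search
-- ===== SOURCE A (Python) =====
-- from typing import List, Optional
--
-- k = [(1, 12, 4),
--      (1, 11, 11),
--      (1, 13, 5),
--      (1, 11, 11),
--      (1, 14, 14),
--      (26, -10, 7),
--      (1, 11, 11),
--      (26, -9, 4),
--      (26, -3, 6),
--      (1, 13, 5),
--      (26, -5, 9),
--      (26, -10, 12),
--      (26, -4, 14),
--      (26, -5, 14)]
--
-- def digit(z: int, w: int, i: int) -> int:
--     rem = z % 26
--     z //= k[i][0]
--     if rem + k[i][1] != w: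
--         z = (z * 26) + (k[i][2] + w)
--     return z
--
-- def search(i: int, z: int, path: List[int]) -> Optional[List[int]]:
--     if i == 14:
--         if z == 0:
--             return path
--         else:
--             return None
--
--     for w in range(9, 0, -1):
--         if k[i][0] == 26:
--             if (z % 26) + k[i][1] != w:
--                 continue
--         p = search(i + 1, digit(z, w, i), path + [w])
--         if p:
--             return p
--     return None
-- ===== SOURCE B (Python) =====
-- from typing import List, Optional
--
-- k = [(1, 12, 4),
--      (1, 11, 11),
--      (1, 13, 5),
--      (1, 11, 11),
--      (1, 14, 14),
--      (26, -10, 7),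
--      (1, 11, 11),
--      (26, -9, 4),
--      (26, -3, 6),
--      (1, 13, 5),
--      (26, -5, 9),
--      (26, -10, 12),
--      (26, -4, 14),
--      (26, -5, 14)]
--
-- def _suffix(i: int, z: int) -> Optional[List[int]]:
--     """Largest digit suffix completing state (i, z), or None."""
--     if i == 14:
--         return [] if z == 0 else None
--     a, b, c = k[i]
--     if a == 26:
--         # a pop step admits at most one digit: w = z % 26 + b
--         w = z % 26 + b
--         if 1 <= w <= 9:
--             s = _suffix(i + 1, z // 26)
--             return None if s is None else [w] + s
--         return None
--     for w in range(9, 0, -1):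
--         base = z // a
--         z2 = base if z % 26 + b == w else base * 26 + (c + w)
--         s = _suffix(i + 1, z2)
--         if s is not None:
--             return [w] + s
--     return None
--
-- def search(i: int, z: int, path: List[int]) -> Optional[List[int]]:
--     s = _suffix(i, z)
--     return None if s is None else path + s
-- ===== Notes on version B (the rewrite author's own statement) =====
-- stated objective: faster
-- what changed: B splits the search into a path-independent suffix solver (so no path+[w] list copy at every node) and computes the single admissible digit of a pop step (k[i][0]==26) arithmetically as z%26+b instead of A's 9-iteration guarded scan.
import Mathlib
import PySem

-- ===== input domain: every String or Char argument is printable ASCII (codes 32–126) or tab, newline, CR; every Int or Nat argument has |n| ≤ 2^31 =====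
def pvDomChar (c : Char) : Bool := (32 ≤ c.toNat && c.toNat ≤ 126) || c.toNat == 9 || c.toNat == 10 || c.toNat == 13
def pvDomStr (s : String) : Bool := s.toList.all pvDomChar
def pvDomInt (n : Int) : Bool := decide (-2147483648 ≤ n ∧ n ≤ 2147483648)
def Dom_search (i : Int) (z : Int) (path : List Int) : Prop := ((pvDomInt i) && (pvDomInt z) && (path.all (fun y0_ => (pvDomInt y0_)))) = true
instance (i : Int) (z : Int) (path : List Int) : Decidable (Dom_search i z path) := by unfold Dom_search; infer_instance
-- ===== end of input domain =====

-- B separates the digit suffix (depending only on (i, z)) from the path prefix and computes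
-- the single admissible digit of a pop step arithmetically instead of scanning 9 candidates.

-- ===== PORT A =====
def kA : List (Int × Int × Int) :=
  [(1, 12, 4), (1, 11, 11), (1, 13, 5), (1, 11, 11), (1, 14, 14), (26, -10, 7),
   (1, 11, 11), (26, -9, 4), (26, -3, 6), (1, 13, 5), (26, -5, 9), (26, -10, 12),
   (26, -4, 14), (26, -5, 14)]

-- used by the ports' termination proofs: a successful k[i] lookup bounds i
theorem kA_idx_bounds {i : Int} {x : Int × Int × Int}
    (h : PySem.List.pyGet? kA i = some x) : -14 ≤ i ∧ i ≤ 13 := by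
  have h2 : PySem.Raise.InRange kA.length i := by
    by_contra hc
    rw [← PySem.List.pyGet?_eq_none_iff] at hc
    simp [h] at hc
  simp only [PySem.Raise.InRange, kA, List.length] at h2
  omega

-- Python's digit(z, w, i); none = IndexError (unreachable from search, which checks k[i] first)
def digitA (z : Int) (w : Int) (i : Int) : Option Int :=
  match PySem.List.pyGet? kA i with
  | none => none
  | some (a, b, c) =>
    let rem := PySem.Int.mod z 26
    let z1 := PySem.Int.floordiv z a
    some (if rem + b ≠ w then z1 * 26 + (c + w) else z1)

mutual
-- literal port of A: DFS trying w = 9 .. 1 at each position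
def search (i : Int) (z : Int) (path : List Int) : Option (List Int) :=
  if i = 14 then
    if z = 0 then some path else none
  else
    match h : PySem.List.pyGet? kA i with
    | none => none                      -- IndexError: excluded by Pre_search
    | some kv => searchLoop i z path kv (kA_idx_bounds h).2 [9, 8, 7, 6, 5, 4, 3, 2, 1]
termination_by ((14 - i).toNat, 10)
decreasing_by all_goals simp_wf; omega

-- the 'for w in range(9, 0, -1)' loop of A (hi is only the termination guard)
def searchLoop (i : Int) (z : Int) (path : List Int) (kv : Int × Int × Int)
    (hi : i ≤ 13) : List Int → Option (List Int)
  | [] => none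
  | w :: ws =>
    if kv.1 = 26 ∧ PySem.Int.mod z 26 + kv.2.1 ≠ w then
      searchLoop i z path kv hi ws     -- continue
    else
      match digitA z w i with
      | none => none                    -- IndexError: unreachable here
      | some z' =>
        match search (i + 1) z' (path ++ [w]) with
        | some p => if p = [] then searchLoop i z path kv hi ws else some p  -- 'if p:' truthiness
        | none => searchLoop i z path kv hi ws
termination_by ws => ((14 - i).toNat, ws.length)
decreasing_by
  all_goals simp_wf
  · omega
  · omega
  · omega
end

-- ===== PORT B =====
def kB : List (Int × Int × Int) :=
  [(1, 12, 4), (1, 11, 11), (1, 13, 5), (1, 11, 11), (1, 14, 14), (26, -10, 7),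
   (1, 11, 11), (26, -9, 4), (26, -3, 6), (1, 13, 5), (26, -5, 9), (26, -10, 12),
   (26, -4, 14), (26, -5, 14)]

theorem kB_eq_kA : kB = kA := rfl

mutual
-- Source B's _suffix: largest digit suffix completing state (i, z), or none
def suffixB (i : Int) (z : Int) : Option (List Int) :=
  if i = 14 then
    if z = 0 then some [] else none
  else
    match h : PySem.List.pyGet? kB i with
    | none => none                      -- IndexError: excluded by Pre_search
    | some (a, b, c) =>
      if a = 26 then
        -- a pop step admits at most one digit: w = z % 26 + b
        let w := PySem.Int.mod z 26 + b
        if 1 ≤ w ∧ w ≤ 9 then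
          match suffixB (i + 1) (PySem.Int.floordiv z 26) with
          | none => none
          | some s => some (w :: s)
        else none
      else
        suffixLoop i z a b c (by rw [kB_eq_kA] at h; exact (kA_idx_bounds h).2)
          [9, 8, 7, 6, 5, 4, 3, 2, 1]
termination_by ((14 - i).toNat, 10)
decreasing_by
  all_goals simp_wf
  · have := kA_idx_bounds (kB_eq_kA ▸ h); omega
  · omega

-- Source B's 'for w in range(9, 0, -1)' loop (hi is only the termination guard)
def suffixLoop (i : Int) (z : Int) (a : Int) (b : Int) (c : Int)
    (hi : i ≤ 13) : List Int → Option (List Int)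
  | [] => none
  | w :: ws =>
    let base := PySem.Int.floordiv z a
    let z2 := if PySem.Int.mod z 26 + b = w then base else base * 26 + (c + w)
    match suffixB (i + 1) z2 with
    | some s => some (w :: s)
    | none => suffixLoop i z a b c hi ws
termination_by ws => ((14 - i).toNat, ws.length)
decreasing_by
  all_goals simp_wf
  · omega
  · omega
end

-- Source B's search: path + suffix
def search_alt (i : Int) (z : Int) (path : List Int) : Option (List Int) :=
  match suffixB i z with
  | none => none
  | some s => some (path ++ s)

-- ===== PRECONDITION & SPEC =====
-- Pre_ excludes only indices i on which Python's k[i] raises IndexError (both A and B raise there).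
def Pre_search (i : Int) (z : Int) (path : List Int) : Prop := -14 ≤ i ∧ i ≤ 14
instance (i : Int) (z : Int) (path : List Int) : Decidable (Pre_search i z path) := by
  unfold Pre_search; infer_instance

def pvWitness_search : Int × Int × List Int := (12, 5, [3, 1])

def Spec_search (i : Int) (z : Int) (path : List Int) (out : Option (List Int)) : Prop := out = search_alt i z path
instance (i : Int) (z : Int) (path : List Int) (out : Option (List Int)) : Decidable (Spec_search i z path out) := by unfold Spec_search; infer_instance

-- ===== CLAIM (what is proved, stated in full; the proofs are below) =====
def Claim_equal_search : Prop := ∀ (i : Int) (z : Int) (path : List Int), Dom_search i z path → Pre_search i z path → Spec_search i z path (search i z path)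

-- ===== LEMMAS AND PROOFS =====

-- the value A's loop produces once it reaches the unique admissible digit w0 of a pop step
def F26 (i : Int) (z : Int) (path : List Int) (w0 : Int) : Option (List Int) :=
  match search (i + 1) (PySem.Int.floordiv z 26) (path ++ [w0]) with
  | some p => if p = [] then none else some p
  | none => none

theorem mem_digits9 (w : Int) :
    w ∈ ([9, 8, 7, 6, 5, 4, 3, 2, 1] : List Int) ↔ 1 ≤ w ∧ w ≤ 9 := by
  simp only [List.mem_cons, List.not_mem_nil, or_false]
  omega

-- A's loop over a pop row (k[i][0] = 26) reduces to the single candidate w0 = z % 26 + b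
theorem loop26 (i : Int) (z : Int) (path : List Int) (b c : Int) (hi : i ≤ 13)
    (hk : PySem.List.pyGet? kA i = some (26, b, c))
    (ws : List Int) (hnd : ws.Nodup) :
    searchLoop i z path (26, b, c) hi ws =
      if (PySem.Int.mod z 26 + b) ∈ ws then F26 i z path (PySem.Int.mod z 26 + b)
      else none := by
  induction ws with
  | nil => simp [searchLoop]
  | cons w ws ih =>
    obtain ⟨hw_nin, hnd'⟩ := List.nodup_cons.mp hnd
    rw [searchLoop]
    by_cases hw : PySem.Int.mod z 26 + b = w
    · -- the loop reaches w0: no continue, digit pops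
      simp only [hw, ne_eq, not_true_eq_false, and_false, if_false]
      rw [digitA, hk]
      simp only [hw, ne_eq, not_true_eq_false, if_neg, ite_false, not_not]
      rw [ih hnd']
      have hnin : (PySem.Int.mod z 26 + b) ∉ ws := hw ▸ hw_nin
      simp only [hw, List.mem_cons, true_or, if_pos, F26]
      cases hs : search (i + 1) (PySem.Int.floordiv z 26) (path ++ [w]) with
      | none => simp
      | some p => by_cases hp : p = [] <;> simp [hp]
    · -- w ≠ w0: continue
      simp only [ne_eq, hw, not_false_eq_true, and_true, if_pos]
      rw [ih hnd']
      rw [if_congr (List.mem_cons.trans (or_iff_right hw)) rfl rfl]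

-- A's loop over a push row agrees with B's loop, up to prepending the path
theorem loopN (i : Int) (z : Int) (path : List Int) (a b c : Int) (hi : i ≤ 13)
    (ha : a ≠ 26) (hk : PySem.List.pyGet? kA i = some (a, b, c))
    (IH : ∀ z' P, search (i + 1) z' P = Option.map (fun s => P ++ s) (suffixB (i + 1) z'))
    (ws : List Int) :
    searchLoop i z path (a, b, c) hi ws =
      Option.map (fun s => path ++ s) (suffixLoop i z a b c hi ws) := by
  induction ws with
  | nil => simp [searchLoop, suffixLoop]
  | cons w ws ih =>
    rw [searchLoop, suffixLoop]
    simp only [ha, false_and, if_false]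
    rw [digitA, hk]
    have hz : (if PySem.Int.mod z 26 + b ≠ w then PySem.Int.floordiv z a * 26 + (c + w)
               else PySem.Int.floordiv z a) =
              (if PySem.Int.mod z 26 + b = w then PySem.Int.floordiv z a
               else PySem.Int.floordiv z a * 26 + (c + w)) := by
      by_cases hw : PySem.Int.mod z 26 + b = w <;> simp only [hw, ne_eq, not_true_eq_false,
        if_false, not_false_eq_true, if_pos, ite_not]
    simp only [hz]
    rw [IH]
    cases hs : suffixB (i + 1) (if PySem.Int.mod z 26 + b = w then PySem.Int.floordiv z a
               else PySem.Int.floordiv z a * 26 + (c + w)) with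
    | none => simpa using ih
    | some s =>
      simp only [Option.map_some]
      simpa [List.append_assoc] using (if_neg (show ¬path ++ ((w :: []) ++ s) = [] by simp))

theorem search_eq (i : Int) (z : Int) (path : List Int) :
    search i z path = Option.map (fun s => path ++ s) (suffixB i z) := by
  by_cases h14 : i = 14
  · subst h14
    rw [search, suffixB]
    by_cases hz : z = 0 <;> simp [hz]
  · rw [search, suffixB]
    simp only [h14, if_false]
    split
    · rename_i hk
      split
      · rfl
      · rename_i a b c hk2
        rw [kB_eq_kA] at hk2
        simp_all
    · rename_i kv hk
      split
      · rename_i hk2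
        rw [kB_eq_kA] at hk2
        simp_all
      · rename_i a b c hk2
        rw [kB_eq_kA, hk] at hk2
        injection hk2 with hkv
        subst hkv
        have hbd := kA_idx_bounds hk
        have IH : ∀ z' P, search (i + 1) z' P =
            Option.map (fun s => P ++ s) (suffixB (i + 1) z') :=
          fun z' P => search_eq (i + 1) z' P
        by_cases ha : a = 26
        · subst ha
          rw [loop26 i z path b c hbd.2 hk _ (by decide)]
          simp only [mem_digits9]
          by_cases hw : 1 ≤ PySem.Int.mod z 26 + b ∧ PySem.Int.mod z 26 + b ≤ 9
          · rw [if_pos hw, if_pos hw]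
            unfold F26
            rw [IH]
            cases hs : suffixB (i + 1) (PySem.Int.floordiv z 26) with
            | none => rfl
            | some s =>
              simp only [if_true, Option.map_some]
              rw [if_neg (by simp)]
              simp [List.append_assoc]
          · rw [if_neg hw, if_neg hw]
            rfl
        · rw [loopN i z path a b c hbd.2 ha hk IH]
          simp [ha]
termination_by (14 - i).toNat
decreasing_by have := kA_idx_bounds hk; omega

theorem search_eq_alt (i : Int) (z : Int) (path : List Int) :
    search i z path = search_alt i z path := by
  rw [search_alt, search_eq]
  cases suffixB i z <;> simp

-- ===== VERDICT (by name: the statement is the Claim_ definition above) =====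
theorem search_spec : Claim_equal_search := by
  intro i z path _ _
  show search i z path = search_alt i z path
  exact search_eq_alt i z path
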